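-- pv_equiv track=rewrite | github.com/qprjack86/cloudplatformfeed | scripts/fetch_feeds.py | _ics_fold_line
-- ===== SOURCE A (Python) =====
-- def _ics_fold_line(line, limit=75):
--     """Fold long iCalendar lines to improve client compatibility."""
--     if len(line) <= limit:
--         return line
--     parts = [line[:limit]]
--     remainder = line[limit:]
--     while remainder:
--         parts.append(" " + remainder[: limit - 1])
--         remainder = remainder[limit - 1 :]
--     return "\r\n".join(parts)
-- ===== SOURCE B (Python) =====
-- def _ics_fold_line(line, limit=75):
--     """Fold long iCalendar lines: single char-by-char pass with a running line count."""
--     out = []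
--     count = 0
--     cap = limit
--     for ch in line:
--         if count == cap:
--             out.append("\r\n ")
--             count = 0
--             cap = limit - 1
--         out.append(ch)
--         count += 1
--     return "".join(out)
-- ===== Notes on version B (the rewrite author's own statement) =====
-- stated objective: alternative
-- what changed: Replaces slice-and-join chunking (build parts via repeated slicing, then '\r\n'.join) with a single character-by-character pass keeping a running count of characters on the current output line and emitting the fold marker inline.
import Mathlib
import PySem

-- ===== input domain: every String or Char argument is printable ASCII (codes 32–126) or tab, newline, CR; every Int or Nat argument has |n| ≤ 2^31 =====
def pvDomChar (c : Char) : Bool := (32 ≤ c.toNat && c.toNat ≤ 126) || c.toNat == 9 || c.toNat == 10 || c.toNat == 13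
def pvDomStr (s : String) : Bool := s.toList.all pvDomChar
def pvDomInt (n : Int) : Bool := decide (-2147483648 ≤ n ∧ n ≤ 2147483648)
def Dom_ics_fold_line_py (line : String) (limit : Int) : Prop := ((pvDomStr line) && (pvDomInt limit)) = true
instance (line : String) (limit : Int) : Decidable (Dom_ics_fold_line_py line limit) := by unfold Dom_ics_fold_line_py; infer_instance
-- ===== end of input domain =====

-- B replaces A's slice-and-join chunking with a single char-by-char pass keeping a running
-- count per output line (alternative decomposition, same O(n) cost).

-- ===== PORT A =====
-- A's while loop: each iteration emits " " + remainder[:limit-1] and drops limit-1 chars;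
-- fuel = remainder length suffices whenever the Python loop terminates (limit ≥ 2).
def icsALoop (limit : Int) (fuel : Nat) (rem : List Char) : List (List Char) :=
  match fuel with
  | 0 => []
  | fuel + 1 =>
    if rem = [] then []
    else (' ' :: PySem.List.slice rem none (some (limit - 1))) ::
      icsALoop limit fuel (PySem.List.slice rem (some (limit - 1)) none)

def ics_fold_line_py (line : String) (limit : Int) : String :=
  if PySem.Str.len line ≤ limit then line
  else
    String.ofList (PySem.Chars.join ['\r', '\n']
      ([PySem.List.slice line.toList none (some limit)] ++
        icsALoop limit (PySem.List.slice line.toList (some limit) none).length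
          (PySem.List.slice line.toList (some limit) none)))

-- ===== PORT B =====
-- Source B's for-loop: state (out buffer, chars on current line, capacity of current line).
def icsBStep (limit : Int) (s : List Char × Int × Int) (ch : Char) : List Char × Int × Int :=
  let (out, count, cap) := s
  let (out, count, cap) := if count = cap then (out ++ ['\r', '\n', ' '], (0 : Int), limit - 1)
                           else (out, count, cap)
  (out ++ [ch], count + 1, cap)

def ics_fold_line_py_alt (line : String) (limit : Int) : String :=
  String.ofList (line.toList.foldl (icsBStep limit) ([], 0, limit)).1

-- ===== PRECONDITION & SPEC =====
-- Pre_ excludes limit ≤ 1 together with a line longer than limit: there Python A's while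
-- loop never shrinks the remainder and diverges (never returns).
def Pre_ics_fold_line_py (line : String) (limit : Int) : Prop :=
  PySem.Str.len line ≤ limit ∨ 2 ≤ limit
instance (line : String) (limit : Int) : Decidable (Pre_ics_fold_line_py line limit) := by
  unfold Pre_ics_fold_line_py; infer_instance

def pvWitness_ics_fold_line_py : String × Int := ("SUMMARY:hello world", 7)

def Spec_ics_fold_line_py (line : String) (limit : Int) (out : String) : Prop := out = ics_fold_line_py_alt line limit
instance (line : String) (limit : Int) (out : String) : Decidable (Spec_ics_fold_line_py line limit out) := by unfold Spec_ics_fold_line_py; infer_instance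

-- ===== CLAIM (what is proved, stated in full; the proofs are below) =====
def Claim_equal_ics_fold_line_py : Prop := ∀ (line : String) (limit : Int), Dom_ics_fold_line_py line limit → Pre_ics_fold_line_py line limit → Spec_ics_fold_line_py line limit (ics_fold_line_py line limit)

-- ===== LEMMAS AND PROOFS =====

-- Recursive characterisation of B's loop body (proof helper).
def icsG (limit : Int) : List Char → Int → Int → List Char
  | [], _, _ => []
  | c :: cs, count, cap =>
    if count = cap then '\r' :: '\n' :: ' ' :: c :: icsG limit cs 1 (limit - 1)
    else c :: icsG limit cs (count + 1) cap

-- B's foldl accumulates out ++ icsG.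
lemma icsB_foldl (limit : Int) (cs : List Char) (out : List Char) (count cap : Int) :
    (cs.foldl (icsBStep limit) (out, count, cap)).1 = out ++ icsG limit cs count cap := by
  induction cs generalizing out count cap with
  | nil => simp [icsG]
  | cons c cs ih =>
    by_cases h : count = cap <;>
      simp [icsBStep, icsG, h, ih, List.append_assoc]

-- When the whole input fits on the current line, icsG copies it unchanged.
lemma icsG_id (limit : Int) (cs : List Char) (count cap : Int)
    (h : (cs.length : Int) + count ≤ cap) :
    icsG limit cs count cap = cs := by
  induction cs generalizing count with
  | nil => simp [icsG]
  | cons c cs ih =>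
    have hne : count ≠ cap := by simp at h; omega
    rw [icsG.eq_def]
    simp only [if_neg hne]
    rw [ih (count + 1) (by simp at h ⊢; omega)]

-- icsG consumes (cap - count) chars on the current line, then folds and restarts at capacity limit-1.
lemma icsG_chunk (limit : Int) (h2 : 2 ≤ limit) (cs : List Char) (count cap : Int)
    (hc : 0 ≤ count) (hcc : count ≤ cap) :
    icsG limit cs count cap =
      if (cs.length : Int) ≤ cap - count then cs
      else cs.take (cap - count).toNat ++ '\r' :: '\n' :: ' ' ::
        icsG limit (cs.drop (cap - count).toNat) 0 (limit - 1) := by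
  induction cs generalizing count with
  | nil => simp [icsG]; omega
  | cons c cs ih =>
    by_cases h : count = cap
    · have hr : cap - count = 0 := by omega
      have hne : (0 : Int) ≠ limit - 1 := by omega
      rw [icsG.eq_def]
      simp only [if_pos h, hr, Int.toNat_zero, List.take_zero, List.drop_zero, List.nil_append]
      rw [if_neg (by simp)]
      conv_rhs => rw [icsG.eq_def]
      simp [hne]
    · have hlt : count < cap := lt_of_le_of_ne hcc h
      rw [icsG.eq_def]
      simp only [if_neg h]
      rw [ih (count + 1) (by omega) (by omega)]
      obtain ⟨k, hk⟩ : ∃ k, (cap - count).toNat = k + 1 := ⟨(cap - count).toNat - 1, by omega⟩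
      have hk' : (cap - (count + 1)).toNat = k := by omega
      by_cases hl : (cs.length : Int) ≤ cap - (count + 1)
      · rw [if_pos hl, if_pos (by simp; omega)]
      · rw [if_neg hl, if_neg (by simp at hl ⊢; omega)]
        rw [hk, hk', List.take_succ_cons, List.drop_succ_cons]
        simp

-- A's while loop, joined with "\r\n", is CRLF ++ SP ++ icsG at capacity limit-1 (for nonempty remainder).
lemma icsALoop_flat (limit : Int) (h2 : 2 ≤ limit) (fuel : Nat) (rem : List Char)
    (hf : rem.length ≤ fuel) :
    (icsALoop limit fuel rem).flatMap (fun p => '\r' :: '\n' :: p) =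
      if rem = [] then [] else '\r' :: '\n' :: ' ' :: icsG limit rem 0 (limit - 1) := by
  induction fuel generalizing rem with
  | zero =>
    have : rem = [] := by
      cases rem with
      | nil => rfl
      | cons a t => simp at hf
    simp [icsALoop, this]
  | succ fuel ih =>
    by_cases hrem : rem = []
    · simp [icsALoop, hrem]
    · rw [icsALoop, if_neg hrem, if_neg hrem]
      have hslice1 : PySem.List.slice rem none (some (limit - 1)) = rem.take (limit - 1).toNat :=
        PySem.List.slice_to rem (by omega : (0:Int) ≤ limit - 1)
      have hslice2 : PySem.List.slice rem (some (limit - 1)) none = rem.drop (limit - 1).toNat :=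
        PySem.List.slice_from rem (by omega : (0:Int) ≤ limit - 1)
      have hm1 : (1 : Nat) ≤ (limit - 1).toNat := by omega
      rw [hslice1, hslice2, List.flatMap_cons,
        ih _ (by simp only [List.length_drop]; omega)]
      rw [icsG_chunk limit h2 rem 0 (limit - 1) le_rfl (by omega)]
      simp only [sub_zero]
      by_cases hl : (rem.length : Int) ≤ limit - 1
      · have hd : rem.drop (limit - 1).toNat = [] := by
          simp only [List.drop_eq_nil_iff]; omega
        rw [if_pos hl, if_pos hd, List.take_of_length_le (by omega : rem.length ≤ (limit - 1).toNat)]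
        simp
      · have hd : rem.drop (limit - 1).toNat ≠ [] := by
          simp only [ne_eq, List.drop_eq_nil_iff]; omega
        rw [if_neg hl, if_neg hd]
        simp

-- join "\r\n" (p :: ps) unfolds to p ++ flatMap of CRLF-prefixed parts.
lemma icsJoin_cons (p : List Char) (ps : List (List Char)) :
    PySem.Chars.join ['\r', '\n'] (p :: ps) =
      p ++ ps.flatMap (fun q => '\r' :: '\n' :: q) := by
  induction ps generalizing p with
  | nil => simp [PySem.Chars.join_singleton]
  | cons q ps ih =>
    rw [PySem.Chars.join_cons_cons, ih q]
    simp

-- ===== VERDICT (by name: the statement is the Claim_ definition above) =====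
theorem ics_fold_line_py_spec : Claim_equal_ics_fold_line_py := by
  intro line limit _ hpre
  unfold Spec_ics_fold_line_py ics_fold_line_py ics_fold_line_py_alt
  rw [icsB_foldl]
  by_cases hshort : PySem.Str.len line ≤ limit
  · rw [if_pos hshort, icsG_id limit line.toList 0 limit
      (by rw [PySem.Str.len_eq] at hshort; omega)]
    simp
  · have h2 : 2 ≤ limit := by
      rcases hpre with h | h
      · exact absurd h hshort
      · exact h
    rw [if_neg hshort]
    have hlen : limit < (line.toList.length : Int) := by
      rw [PySem.Str.len_eq] at hshort; omega
    have hslice2 : PySem.List.slice line.toList (some limit) none = line.toList.drop limit.toNat :=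
      PySem.List.slice_from line.toList (by omega : (0:Int) ≤ limit)
    rw [PySem.List.slice_to line.toList (by omega : (0:Int) ≤ limit), hslice2, List.singleton_append,
      icsJoin_cons, icsALoop_flat limit h2 _ _ le_rfl]
    have hd : line.toList.drop limit.toNat ≠ [] := by
      simp only [ne_eq, List.drop_eq_nil_iff]; omega
    rw [if_neg hd,
      icsG_chunk limit h2 line.toList 0 limit le_rfl (by omega),
      if_neg (by simp only [sub_zero]; omega)]
    simp
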